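-- pv_equiv track=rewrite | github.com/MishMash-Norway/mishmash-web | scripts/generate_directory_entries.py | render_entry
-- ===== SOURCE A (Python) =====
-- def render_entry(entry_type: str, name: str, slug: str, sources: list[str]) -> str:
--     source_block = "\n".join([f"  - {s}" for s in sources]) if sources else "  -"
--     if entry_type == "person":
--         return f"""---
-- type: person
-- slug: {slug}
-- name: {name}
-- image: /images/people/{slug}.jpg
-- institutions: []
-- projects: []
-- roles: []
-- urls:
--   website:
--   github:
--   linkedin:
--   orcid:
-- aliases: []
-- tags: []
-- search_keywords: []
-- source_mentions:
-- {source_block}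
-- summary:
-- ---
--
-- # {name}
--
-- """
--     if entry_type == "institution":
--         return f"""---
-- type: institution
-- slug: {slug}
-- name: {name}
-- image: /images/institutions/{slug}.png
-- people: []
-- projects: []
-- country:
-- city:
-- urls:
--   website:
--   wikipedia:
-- aliases: []
-- tags: []
-- search_keywords: []
-- source_mentions:
-- {source_block}
-- summary:
-- ---
--
-- # {name}
--
-- """
--     return f"""---
-- type: project
-- slug: {slug}
-- name: {name}
-- image: /images/projects/{slug}.jpg
-- people: []
-- institutions: []
-- status: active
-- start_date:
-- end_date:
-- urls:
--   website:
--   repository: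
-- aliases: []
-- tags: []
-- search_keywords: []
-- source_mentions:
-- {source_block}
-- summary:
-- ---
--
-- # {name}
--
-- """
-- ===== SOURCE B (Python) =====
-- def render_entry(entry_type: str, name: str, slug: str, sources: list[str]) -> str:
--     source_block = "\n".join([f"  - {s}" for s in sources]) if sources else "  -"
--     specific = {
--         "person": ("people", "jpg",
--                    ["institutions: []", "projects: []", "roles: []",
--                     "urls:", "  website:", "  github:", "  linkedin:", "  orcid:"]),
--         "institution": ("institutions", "png",
--                         ["people: []", "projects: []", "country:", "city:",
--                          "urls:", "  website:", "  wikipedia:"]),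
--     }
--     typ = entry_type if entry_type in specific else "project"
--     folder, ext, mid = specific.get(entry_type,
--         ("projects", "jpg",
--          ["people: []", "institutions: []", "status: active", "start_date:",
--           "end_date:", "urls:", "  website:", "  repository:"]))
--     lines = (["---", f"type: {typ}", f"slug: {slug}", f"name: {name}",
--               f"image: /images/{folder}/{slug}.{ext}"]
--              + mid
--              + ["aliases: []", "tags: []", "search_keywords: []",
--                 "source_mentions:", source_block, "summary:", "---", "",
--                 f"# {name}", "", ""])
--     return "\n".join(lines)
-- ===== Notes on version B (the rewrite author's own statement) =====
-- stated objective: alternative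
-- what changed: Replaces A's three monolithic f-string templates with a per-type table (dict) of frontmatter data plus an ordered line list assembled and joined with newlines.
import Mathlib
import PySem

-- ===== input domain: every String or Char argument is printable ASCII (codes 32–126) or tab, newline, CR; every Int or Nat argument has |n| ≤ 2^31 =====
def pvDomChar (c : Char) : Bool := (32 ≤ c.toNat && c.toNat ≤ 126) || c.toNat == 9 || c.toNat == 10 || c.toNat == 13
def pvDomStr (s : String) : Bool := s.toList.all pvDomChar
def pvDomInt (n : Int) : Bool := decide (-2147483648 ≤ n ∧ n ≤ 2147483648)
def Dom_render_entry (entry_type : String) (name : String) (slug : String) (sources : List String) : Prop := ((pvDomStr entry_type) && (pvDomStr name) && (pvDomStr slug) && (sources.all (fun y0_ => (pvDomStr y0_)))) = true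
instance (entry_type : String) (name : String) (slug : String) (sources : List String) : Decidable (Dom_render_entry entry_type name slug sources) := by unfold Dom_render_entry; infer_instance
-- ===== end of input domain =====

-- B renders the entry from an ordered per-type field table (dict of frontmatter lines) joined with newlines, instead of A's three literal templates; objective: alternative (same output, same cost).

-- ===== PORT A =====
def render_entry (entry_type : String) (name : String) (slug : String) (sources : List String) : String :=
  let sb := if sources.isEmpty then "  -" else PySem.Str.join "\n" (sources.map (fun s => "  - " ++ s))
  if entry_type = "person" then
    "---\ntype: person\nslug: " ++ slug ++ "\nname: " ++ name ++ "\nimage: /images/people/" ++ slug ++ ".jpg\ninstitutions: []\nprojects: []\nroles: []\nurls:\n  website:\n  github:\n  linkedin:\n  orcid:\naliases: []\ntags: []\nsearch_keywords: []\nsource_mentions:\n" ++ sb ++ "\nsummary:\n---\n\n# " ++ name ++ "\n\n"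
  else if entry_type = "institution" then
    "---\ntype: institution\nslug: " ++ slug ++ "\nname: " ++ name ++ "\nimage: /images/institutions/" ++ slug ++ ".png\npeople: []\nprojects: []\ncountry:\ncity:\nurls:\n  website:\n  wikipedia:\naliases: []\ntags: []\nsearch_keywords: []\nsource_mentions:\n" ++ sb ++ "\nsummary:\n---\n\n# " ++ name ++ "\n\n"
  else
    "---\ntype: project\nslug: " ++ slug ++ "\nname: " ++ name ++ "\nimage: /images/projects/" ++ slug ++ ".jpg\npeople: []\ninstitutions: []\nstatus: active\nstart_date:\nend_date:\nurls:\n  website:\n  repository:\naliases: []\ntags: []\nsearch_keywords: []\nsource_mentions:\n" ++ sb ++ "\nsummary:\n---\n\n# " ++ name ++ "\n\n"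

-- ===== PORT B =====
def render_entry_alt (entry_type : String) (name : String) (slug : String) (sources : List String) : String :=
  let sb := if sources.isEmpty then "  -" else PySem.Str.join "\n" (sources.map (fun s => "  - " ++ s))
  let specific : PySem.Dict String (String × String × List String) :=
    (PySem.Dict.empty.insert "person" ("people", "jpg", ["institutions: []", "projects: []", "roles: []", "urls:", "  website:", "  github:", "  linkedin:", "  orcid:"])).insert "institution" ("institutions", "png", ["people: []", "projects: []", "country:", "city:", "urls:", "  website:", "  wikipedia:"])
  let typ := if specific.contains entry_type then entry_type else "project"
  let fem := specific.getD entry_type ("projects", "jpg", ["people: []", "institutions: []", "status: active", "start_date:", "end_date:", "urls:", "  website:", "  repository:"])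
  PySem.Str.join "\n" (((["---", "type: " ++ typ, "slug: " ++ slug, "name: " ++ name, "image: /images/" ++ fem.1 ++ "/" ++ slug ++ "." ++ fem.2.1] ++ fem.2.2) ++ ["aliases: []", "tags: []", "search_keywords: []", "source_mentions:", sb, "summary:", "---", "", "# " ++ name, "", ""]))

-- ===== PRECONDITION & SPEC =====
def Spec_render_entry (entry_type : String) (name : String) (slug : String) (sources : List String) (out : String) : Prop := out = render_entry_alt entry_type name slug sources
instance (entry_type : String) (name : String) (slug : String) (sources : List String) (out : String) : Decidable (Spec_render_entry entry_type name slug sources out) := by unfold Spec_render_entry; infer_instance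

-- ===== CLAIM (what is proved, stated in full; the proofs are below) =====
def Claim_equal_render_entry : Prop := ∀ (entry_type : String) (name : String) (slug : String) (sources : List String), Dom_render_entry entry_type name slug sources → Spec_render_entry entry_type name slug sources (render_entry entry_type name slug sources)

-- ===== LEMMAS AND PROOFS =====
set_option maxRecDepth 8192 in
theorem branch_person (name slug sb : String) :
    ("---\ntype: person\nslug: " ++ slug ++ "\nname: " ++ name ++ "\nimage: /images/people/" ++ slug ++ ".jpg\ninstitutions: []\nprojects: []\nroles: []\nurls:\n  website:\n  github:\n  linkedin:\n  orcid:\naliases: []\ntags: []\nsearch_keywords: []\nsource_mentions:\n" ++ sb ++ "\nsummary:\n---\n\n# " ++ name ++ "\n\n") = PySem.Str.join "\n" ((["---", "type: " ++ "person", "slug: " ++ slug, "name: " ++ name, "image: /images/" ++ "people" ++ "/" ++ slug ++ "." ++ "jpg"] ++ ["institutions: []", "projects: []", "roles: []", "urls:", "  website:", "  github:", "  linkedin:", "  orcid:"]) ++ ["aliases: []", "tags: []", "search_keywords: []", "source_mentions:", sb, "summary:", "---", "", "# " ++ name, "", ""]) := by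
  apply String.toList_injective ?_
  simp [PySem.Str.join, PySem.Chars.join, List.intercalate, List.intersperse]

set_option maxRecDepth 8192 in
theorem branch_institution (name slug sb : String) :
    ("---\ntype: institution\nslug: " ++ slug ++ "\nname: " ++ name ++ "\nimage: /images/institutions/" ++ slug ++ ".png\npeople: []\nprojects: []\ncountry:\ncity:\nurls:\n  website:\n  wikipedia:\naliases: []\ntags: []\nsearch_keywords: []\nsource_mentions:\n" ++ sb ++ "\nsummary:\n---\n\n# " ++ name ++ "\n\n") = PySem.Str.join "\n" ((["---", "type: " ++ "institution", "slug: " ++ slug, "name: " ++ name, "image: /images/" ++ "institutions" ++ "/" ++ slug ++ "." ++ "png"] ++ ["people: []", "projects: []", "country:", "city:", "urls:", "  website:", "  wikipedia:"]) ++ ["aliases: []", "tags: []", "search_keywords: []", "source_mentions:", sb, "summary:", "---", "", "# " ++ name, "", ""]) := by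
  apply String.toList_injective ?_
  simp [PySem.Str.join, PySem.Chars.join, List.intercalate, List.intersperse]

set_option maxRecDepth 8192 in
theorem branch_project (name slug sb : String) :
    ("---\ntype: project\nslug: " ++ slug ++ "\nname: " ++ name ++ "\nimage: /images/projects/" ++ slug ++ ".jpg\npeople: []\ninstitutions: []\nstatus: active\nstart_date:\nend_date:\nurls:\n  website:\n  repository:\naliases: []\ntags: []\nsearch_keywords: []\nsource_mentions:\n" ++ sb ++ "\nsummary:\n---\n\n# " ++ name ++ "\n\n") = PySem.Str.join "\n" ((["---", "type: " ++ "project", "slug: " ++ slug, "name: " ++ name, "image: /images/" ++ "projects" ++ "/" ++ slug ++ "." ++ "jpg"] ++ ["people: []", "institutions: []", "status: active", "start_date:", "end_date:", "urls:", "  website:", "  repository:"]) ++ ["aliases: []", "tags: []", "search_keywords: []", "source_mentions:", sb, "summary:", "---", "", "# " ++ name, "", ""]) := by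
  apply String.toList_injective ?_
  simp [PySem.Str.join, PySem.Chars.join, List.intercalate, List.intersperse]

-- ===== VERDICT (by name: the statement is the Claim_ definition above) =====
theorem render_entry_spec : Claim_equal_render_entry := by
  intro entry_type name slug sources _
  unfold Spec_render_entry render_entry render_entry_alt
  simp only [PySem.Dict.contains_insert, PySem.Dict.contains_empty, PySem.Dict.getD_insert,
    Bool.or_false]
  by_cases h1 : entry_type = "person"
  · subst h1
    simp only [if_neg (by decide : ¬ ("person" : String) = "institution")]
    exact branch_person name slug _
  · by_cases h2 : entry_type = "institution"
    · subst h2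
      simp only [if_neg (by decide : ¬ ("institution" : String) = "person"), beq_self_eq_true,
        Bool.true_or]
      exact branch_institution name slug _
    · have e1 : (entry_type == "person") = false := beq_eq_false_iff_ne.mpr h1
      have e2 : (entry_type == "institution") = false := beq_eq_false_iff_ne.mpr h2
      simp only [if_neg h1, if_neg h2, e1, e2, Bool.or_false, Bool.false_eq_true, if_false,
        PySem.Dict.getD_empty]
      exact branch_project name slug _
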